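-- pv_equiv track=rewrite | github.com/user234651/ChekalinEU | lab11/src/z_function.py | z_search
-- ===== SOURCE A (Python) =====
-- def compute_z_function(input_string: str) -> list[int]:
--     """
--     Вычисление Z-функции для строки.
--
--     Сложность: O(n)
--     Память: O(n)
--     """
--     n = len(input_string)
--     z_array = [0] * n
--     z_array[0] = n
--
--     left_idx, right_idx = 0, 0
--
--     for i in range(1, n):
--         if i > right_idx:
--             left_idx, right_idx = i, i
--             while right_idx < n and input_string[right_idx - left_idx] == input_string[right_idx]:
--                 right_idx += 1
--             z_array[i] = right_idx - left_idx
--             right_idx -= 1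
--         else:
--             k = i - left_idx
--
--             if z_array[k] < right_idx - i + 1:
--                 z_array[i] = z_array[k]
--             else:
--                 left_idx = i
--                 while right_idx < n and input_string[right_idx - left_idx] == input_string[right_idx]:
--                     right_idx += 1
--                 z_array[i] = right_idx - left_idx
--                 right_idx -= 1
--
--     return z_array
--
-- def z_search(text_data: str, pattern_data: str) -> list[int]:
--     """
--     Поиск паттерна с использованием Z-функции.
--     """
--     if not pattern_data or not text_data:
--         return []
--
--     m = len(pattern_data)
--     n = len(text_data)
--
--     if m > n:
--         return []
--
--     combined_string = pattern_data + "#" + text_data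
--     z_result = compute_z_function(combined_string)
--
--     matches_list = []
--     for i in range(m + 1, len(combined_string)):
--         if z_result[i] == m:
--             matches_list.append(i - m - 1)
--
--     return matches_list
-- ===== SOURCE B (Python) =====
-- def z_search(text_data: str, pattern_data: str) -> list[int]:
--     """Pattern search by direct sliding-window comparison (no Z-function)."""
--     if not pattern_data:
--         return []
--     m = len(pattern_data)
--     return [i for i in range(len(text_data) - m + 1) if text_data[i:i+m] == pattern_data]
-- ===== Notes on version B (the rewrite author's own statement) =====
-- stated objective: simpler
-- what changed: Replaced the Z-function over pattern+'#'+text with a direct sliding-window comparison over the text, which also fixes A's separator collision: A misses occurrences immediately followed by '#'.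
-- intended difference: On texts where the pattern occurs at a position immediately followed by the character '#', A omits that occurrence (the Z-value exceeds m there because the separator '#' also matches), while B reports every occurrence; reporting all occurrences is clearly the intended behaviour. — e.g. on z_search("a##", "a#"): A returns [], B returns [0]
import Mathlib
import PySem

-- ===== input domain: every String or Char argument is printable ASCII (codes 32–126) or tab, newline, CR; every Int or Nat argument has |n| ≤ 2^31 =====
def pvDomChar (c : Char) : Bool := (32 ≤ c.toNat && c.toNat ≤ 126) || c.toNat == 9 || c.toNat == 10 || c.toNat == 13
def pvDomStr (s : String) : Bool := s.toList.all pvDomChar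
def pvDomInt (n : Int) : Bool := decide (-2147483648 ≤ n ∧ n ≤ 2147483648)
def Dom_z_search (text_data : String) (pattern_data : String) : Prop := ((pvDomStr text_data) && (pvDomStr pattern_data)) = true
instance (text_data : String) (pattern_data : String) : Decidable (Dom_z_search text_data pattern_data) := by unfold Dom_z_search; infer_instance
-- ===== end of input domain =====

-- B replaces the Z-function search with a direct sliding-window scan; A's separator
-- collision (occurrences followed by '#') is stated as the intended difference D_ below.

-- ===== PORT A =====
-- the inner `while right_idx < n and s[right_idx-left_idx] == s[right_idx]` loop;
-- fuel = n - right_idx makes the recursion structural, enough for the Python loop.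
def extendRun (s : List Char) (l r : Nat) : Nat → Nat
  | 0 => r
  | fuel + 1 =>
    if r < s.length ∧ s.getD (r - l) ' ' = s.getD r ' ' then extendRun s l (r + 1) fuel
    else r

-- one iteration of `for i in range(1, n)` over the state (z_array, left_idx, right_idx)
def zStep (s : List Char) : List Nat × Nat × Nat → Nat → List Nat × Nat × Nat
  | (z, l, r), i =>
  if r < i then
    let r' := extendRun s i i (s.length - i)
    (z.set i (r' - i), i, r' - 1)
  else
    let k := i - l
    if z.getD k 0 < r - i + 1 then
      (z.set i (z.getD k 0), l, r)
    else
      let r' := extendRun s i r (s.length - r)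
      (z.set i (r' - i), i, r' - 1)

def compute_z_function (s : List Char) : List Nat :=
  let n := s.length
  let z0 := (List.replicate n 0).set 0 n
  (((List.range' 1 (n - 1)).foldl (zStep s) (z0, 0, 0))).1

def z_search (text_data : String) (pattern_data : String) : List Int :=
  if pattern_data = "" ∨ text_data = "" then []
  else
    let m := pattern_data.toList.length
    let n := text_data.toList.length
    if m > n then []
    else
      let comb := pattern_data.toList ++ '#' :: text_data.toList
      let zr := compute_z_function comb
      (PySem.List.pyRange ((m : Int) + 1) ((comb.length : Nat) : Int) 1).foldl
        (fun acc i => if zr.getD i.toNat 0 = m then acc ++ [i - (m : Int) - 1] else acc) []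

-- ===== PORT B =====
def z_search_alt (text_data : String) (pattern_data : String) : List Int :=
  if pattern_data = "" then []
  else
    let tl := text_data.toList
    let pl := pattern_data.toList
    let m := pl.length
    (PySem.List.pyRange 0 (((tl.length : Nat) : Int) - (m : Int) + 1) 1).filter
      (fun i => decide (PySem.List.slice tl (some i) (some (i + (m : Int))) = pl))

-- ===== PRECONDITION & SPEC =====
-- On texts where the pattern occurs at a position immediately followed by '#', A omits that
-- occurrence (the separator '#' also matches, so the Z-value exceeds m), while B reports every
-- occurrence; reporting all occurrences is the intended behaviour.
def D_z_search (text_data : String) (pattern_data : String) : Prop :=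
  pattern_data ≠ "" ∧ '#' ∈ text_data.toList ∧ (pattern_data.toList ++ ['#']) <:+: text_data.toList
instance (text_data : String) (pattern_data : String) : Decidable (D_z_search text_data pattern_data) := by
  unfold D_z_search; infer_instance

def Spec_z_search (text_data : String) (pattern_data : String) (out : List Int) : Prop :=
  ¬ D_z_search text_data pattern_data → out = z_search_alt text_data pattern_data
instance (text_data : String) (pattern_data : String) (out : List Int) : Decidable (Spec_z_search text_data pattern_data out) := by
  unfold Spec_z_search; infer_instance

def pvDiffWitness_z_search : String × String := ("a##", "a#")
def pvDiffWitnessOut_z_search : (List Int) × (List Int) := ([], [0])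

-- ===== CLAIM (what is proved, stated in full; the proofs are below) =====
def Claim_unchanged_z_search : Prop := ∀ (text_data : String) (pattern_data : String), Dom_z_search text_data pattern_data → Spec_z_search text_data pattern_data (z_search text_data pattern_data)
def Claim_changed_z_search : Prop := Dom_z_search (pvDiffWitness_z_search.1) (pvDiffWitness_z_search.2) ∧ D_z_search (pvDiffWitness_z_search.1) (pvDiffWitness_z_search.2) ∧ z_search (pvDiffWitness_z_search.1) (pvDiffWitness_z_search.2) = pvDiffWitnessOut_z_search.1 ∧ z_search_alt (pvDiffWitness_z_search.1) (pvDiffWitness_z_search.2) = pvDiffWitnessOut_z_search.2 ∧ pvDiffWitnessOut_z_search.1 ≠ pvDiffWitnessOut_z_search.2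
def Claim_exact_z_search : Prop := ∀ (text_data : String) (pattern_data : String), Dom_z_search text_data pattern_data → D_z_search text_data pattern_data → z_search text_data pattern_data ≠ z_search_alt text_data pattern_data

-- ===== LEMMAS AND PROOFS =====

-- longest common prefix length of two lists
def lcp : List Char → List Char → Nat
  | a :: as, b :: bs => if a = b then lcp as bs + 1 else 0
  | _, _ => 0

-- zf s i = Z-function value of s at i (length of longest common prefix of s and s.drop i)
def zf (s : List Char) (i : Nat) : Nat := lcp s (s.drop i)

theorem lcp_le_right : ∀ xs ys : List Char, lcp xs ys ≤ ys.length := by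
  intro xs; induction xs with
  | nil => intro ys; cases ys <;> simp [lcp]
  | cons a as ih =>
    intro ys; cases ys with
    | nil => simp [lcp]
    | cons b bs => by_cases h : a = b <;> simp [lcp, h] <;> exact ih bs

theorem lcp_agree : ∀ (xs ys : List Char) (j : Nat) (d : Char), j < lcp xs ys →
    xs.getD j d = ys.getD j d := by
  intro xs; induction xs with
  | nil => intro ys j d h; cases ys <;> simp [lcp] at h
  | cons a as ih =>
    intro ys j d h
    cases ys with
    | nil => simp [lcp] at h
    | cons b bs =>
      by_cases hab : a = b
      · cases j with
        | zero => simpa using hab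
        | succ j => simp [lcp, hab] at h ⊢; exact ih bs j d (by omega)
      · simp [lcp, hab] at h

theorem lcp_ge : ∀ (xs ys : List Char) (k : Nat) (d : Char), k ≤ xs.length → k ≤ ys.length →
    (∀ j < k, xs.getD j d = ys.getD j d) → k ≤ lcp xs ys := by
  intro xs; induction xs with
  | nil => intro ys k d h1 _ _; simp at h1; omega
  | cons a as ih =>
    intro ys k d h1 h2 hag
    cases k with
    | zero => omega
    | succ k =>
      cases ys with
      | nil => simp at h2
      | cons b bs =>
        have hab : a = b := by have := hag 0 (by omega); simpa using this
        have : k ≤ lcp as bs := by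
          refine ih bs k d (by simpa using h1) (by simpa using h2) ?_
          intro j hj
          have := hag (j + 1) (by omega)
          simpa using this
        simp [lcp, hab]; omega

theorem lcp_stuck : ∀ (xs ys : List Char) (d : Char), lcp xs ys < xs.length →
    lcp xs ys < ys.length → xs.getD (lcp xs ys) d ≠ ys.getD (lcp xs ys) d := by
  intro xs; induction xs with
  | nil => intro ys d h1 _; simp at h1
  | cons a as ih =>
    intro ys d h1 h2
    cases ys with
    | nil => simp at h2
    | cons b bs =>
      by_cases hab : a = b
      · simp [lcp, hab] at h1 h2 ⊢
        exact ih bs d (by omega) (by omega)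
      · simpa [lcp, hab] using hab

theorem getD_drop (s : List Char) (i j : Nat) (d : Char) : (s.drop i).getD j d = s.getD (i + j) d := by
  simp [List.getD, List.getElem?_drop]

theorem zf_le (s : List Char) (i : Nat) : zf s i ≤ s.length - i := by
  have := lcp_le_right s (s.drop i)
  simpa [zf] using this

theorem zf_agree (s : List Char) (i j : Nat) (d : Char) (h : j < zf s i) :
    s.getD j d = s.getD (i + j) d := by
  have := lcp_agree s (s.drop i) j d h
  rwa [getD_drop] at this

theorem zf_ge (s : List Char) (i k : Nat) (d : Char) (h1 : k ≤ s.length - i)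
    (h2 : ∀ j < k, s.getD j d = s.getD (i + j) d) : k ≤ zf s i := by
  refine lcp_ge s (s.drop i) k d (by omega) (by simp; omega) ?_
  intro j hj; rw [getD_drop]; exact h2 j hj

theorem zf_stuck (s : List Char) (i : Nat) (d : Char) (h : zf s i < s.length - i) :
    s.getD (zf s i) d ≠ s.getD (i + zf s i) d := by
  have h' : lcp s (s.drop i) < s.length - i := h
  have h1 : lcp s (s.drop i) < s.length := by omega
  have h2 : lcp s (s.drop i) < (s.drop i).length := by simp; omega
  have := lcp_stuck s (s.drop i) d h1 h2
  rw [getD_drop] at this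
  exact this

theorem lcp_self : ∀ xs : List Char, lcp xs xs = xs.length := by
  intro xs; induction xs with
  | nil => simp [lcp]
  | cons a as ih => simp [lcp, ih]

theorem zf_zero (s : List Char) : zf s 0 = s.length := by simp [zf, lcp_self]

theorem getD_set_self {z : List Nat} {i v : Nat} (h : i < z.length) :
    (z.set i v).getD i 0 = v := by
  simp [List.getD, List.getElem?_set_self, h]

theorem getD_set_ne {z : List Nat} {i j v : Nat} (h : j ≠ i) :
    (z.set i v).getD j 0 = z.getD j 0 := by
  simp [List.getD, List.getElem?_set_ne (by omega : i ≠ j)]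

theorem extendRun_eq (s : List Char) (l : Nat) :
    ∀ (fuel r : Nat), l ≤ r → r ≤ s.length → s.length ≤ r + fuel →
    (∀ j < r - l, s.getD j ' ' = s.getD (l + j) ' ') →
    extendRun s l r fuel = l + zf s l := by
  intro fuel
  induction fuel with
  | zero =>
    intro r hlr hrn hnf hag
    have hrn' : r = s.length := by omega
    have h1 : r - l ≤ zf s l := zf_ge s l (r - l) ' ' (by omega)
      (fun j hj => hag j hj)
    have h2 : zf s l ≤ r - l := by have := zf_le s l; omega
    simp [extendRun]; omega
  | succ fuel ih =>
    intro r hlr hrn hnf hag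
    by_cases hc : r < s.length ∧ s.getD (r - l) ' ' = s.getD r ' '
    · rw [extendRun, if_pos hc]
      refine ih (r + 1) (by omega) (by omega) (by omega) ?_
      intro j hj
      by_cases hj' : j < r - l
      · exact hag j hj'
      · have hjr : j = r - l := by omega
        subst hjr
        have : l + (r - l) = r := by omega
        rw [this]
        exact hc.2
    · rw [extendRun, if_neg hc]
      have h1 : r - l ≤ zf s l := zf_ge s l (r - l) ' ' (by omega) (fun j hj => hag j hj)
      have h2 : zf s l ≤ r - l := by
        by_contra hgt
        push_neg at hgt
        have hzle := zf_le s l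
        have hrlt : r < s.length := by omega
        have : s.getD (r - l) ' ' = s.getD (l + (r - l)) ' ' := zf_agree s l (r - l) ' ' (by omega)
        rw [(by omega : l + (r - l) = r)] at this
        exact hc ⟨hrlt, this⟩
      omega

theorem zf_copy (s : List Char) (l i r : Nat) (hli : l ≤ i) (hir : i ≤ r)
    (hr : r < s.length) (hwin : r + 1 ≤ l + zf s l) (hzk : zf s (i - l) < r - i + 1) :
    zf s i = zf s (i - l) := by
  set k := i - l with hk
  have hlk : l + k = i := by omega
  have hge : zf s k ≤ zf s i := by
    refine zf_ge s i (zf s k) ' ' (by omega) ?_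
    intro j hj
    have h1 : s.getD j ' ' = s.getD (k + j) ' ' := zf_agree s k j ' ' hj
    have h2 : s.getD (k + j) ' ' = s.getD (l + (k + j)) ' ' := zf_agree s l (k + j) ' ' (by omega)
    rw [h1, h2, (by omega : l + (k + j) = i + j)]
  have hle : zf s i ≤ zf s k := by
    by_contra hgt
    push_neg at hgt
    have hstuck : s.getD (zf s k) ' ' ≠ s.getD (k + zf s k) ' ' := by
      refine zf_stuck s k ' ' ?_
      omega
    have h1 : s.getD (zf s k) ' ' = s.getD (i + zf s k) ' ' := zf_agree s i (zf s k) ' ' hgt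
    have h2 : s.getD (k + zf s k) ' ' = s.getD (l + (k + zf s k)) ' ' :=
      zf_agree s l (k + zf s k) ' ' (by omega)
    rw [(by omega : l + (k + zf s k) = i + zf s k)] at h2
    exact hstuck (by rw [h1, ← h2])
  omega

theorem zloop_inv (s : List Char) :
    ∀ (cnt i : Nat) (z : List Nat) (l r : Nat),
    i + cnt = s.length → 1 ≤ i → z.length = s.length → l < i → r < s.length →
    (l = 0 → r < i) → r + 1 ≤ l + zf s l →
    (∀ j < i, z.getD j 0 = zf s j) →
    ∀ j < s.length, (((List.range' i cnt).foldl (zStep s) (z, l, r)).1).getD j 0 = zf s j := by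
  intro cnt
  induction cnt with
  | zero =>
    intro i z l r hcnt _ _ _ _ _ _ hz j hj
    simpa using hz j (by omega)
  | succ cnt ih =>
    intro i z l r hcnt hi hlen hli hr hl0 hwin hz j hj
    have hin : i < s.length := by omega
    rw [List.range'_succ, List.foldl_cons]
    -- common facts for the two extend branches
    have hset : ∀ v, ((z.set i v).length = s.length) := by intro v; simp [hlen]
    by_cases hc1 : r < i
    · -- first branch: i > right_idx
      have hstep : zStep s (z, l, r) i = (z.set i (extendRun s i i (s.length - i) - i), i,
            extendRun s i i (s.length - i) - 1) := by
        show (if r < i then _ else _) = _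
        rw [if_pos hc1]
      rw [hstep]
      have her : extendRun s i i (s.length - i) = i + zf s i :=
        extendRun_eq s i (s.length - i) i le_rfl (by omega) (by omega) (by omega)
      rw [her]
      have hzle := zf_le s i
      refine ih (i + 1) _ i (i + zf s i - 1) (by omega) (by omega) (by simp [hlen])
        (by omega) (by omega) (by omega) (by omega) ?_ j hj
      intro j' hj'
      by_cases hje : j' = i
      · rw [hje, (by omega : i + zf s i - i = zf s i), getD_set_self (by omega)]
      · rw [getD_set_ne hje]; exact hz j' (by omega)
    · -- i ≤ r
      push_neg at hc1
      have hl1 : 1 ≤ l := by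
        by_contra h
        have : l = 0 := by omega
        have := hl0 this; omega
      have hki : i - l < i := by omega
      have hzk : z.getD (i - l) 0 = zf s (i - l) := hz (i - l) hki
      by_cases hc2 : z.getD (i - l) 0 < r - i + 1
      · -- copy branch
        have hstep : zStep s (z, l, r) i = (z.set i (z.getD (i - l) 0), l, r) := by
          show (if r < i then _ else _) = _
          rw [if_neg (by omega), if_pos hc2]
        rw [hstep]
        have hcopy : zf s i = zf s (i - l) := zf_copy s l i r (by omega) hc1 hr hwin (by omega)
        refine ih (i + 1) _ l r (by omega) (by omega) (by simp [hlen]) (by omega) hr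
          (by omega) hwin ?_ j hj
        intro j' hj'
        by_cases hje : j' = i
        · subst hje; rw [getD_set_self (by omega), hzk, hcopy]
        · rw [getD_set_ne hje]; exact hz j' (by omega)
      · -- extend-from-r branch
        have hstep : zStep s (z, l, r) i = (z.set i (extendRun s i r (s.length - r) - i), i,
              extendRun s i r (s.length - r) - 1) := by
          show (if r < i then _ else _) = _
          rw [if_neg (by omega), if_neg hc2]
        rw [hstep]
        have hag : ∀ j' < r - i, s.getD j' ' ' = s.getD (i + j') ' ' := by
          intro j' hj'
          have h2 : s.getD (i - l + j') ' ' = s.getD (l + (i - l + j')) ' ' :=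
            zf_agree s l (i - l + j') ' ' (by omega)
          rw [(by omega : l + (i - l + j') = i + j')] at h2
          have h1 : s.getD j' ' ' = s.getD (i - l + j') ' ' :=
            zf_agree s (i - l) j' ' ' (by omega)
          rw [h1, h2]
        have her : extendRun s i r (s.length - r) = i + zf s i :=
          extendRun_eq s i (s.length - r) r hc1 (by omega) (by omega) hag
        rw [her]
        have hzle := zf_le s i
        refine ih (i + 1) _ i (i + zf s i - 1) (by omega) (by omega) (by simp [hlen])
          (by omega) (by omega) (by omega) (by omega) ?_ j hj
        intro j' hj'
        by_cases hje : j' = i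
        · rw [hje, (by omega : i + zf s i - i = zf s i), getD_set_self (by omega)]
        · rw [getD_set_ne hje]; exact hz j' (by omega)

theorem compute_z_getD (s : List Char) (hs : s ≠ []) :
    ∀ j < s.length, (compute_z_function s).getD j 0 = zf s j := by
  intro j hj
  have hn : 1 ≤ s.length := by
    cases s with
    | nil => simp at hs
    | cons a as => simp
  unfold compute_z_function
  refine zloop_inv s (s.length - 1) 1 _ 0 0 (by omega) le_rfl (by simp) (by omega)
    (by omega) (by omega) (by rw [zf_zero]; omega) ?_ j hj
  intro j' hj'
  have : j' = 0 := by omega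
  subst this
  rw [getD_set_self (by simp; omega), zf_zero]

theorem combGet_lo (pl tl : List Char) (x : Nat) (d : Char) (h : x < pl.length) :
    (pl ++ '#' :: tl).getD x d = pl.getD x d := by
  simp [List.getD, List.getElem?_append_left h]

theorem combGet_sep (pl tl : List Char) (d : Char) :
    (pl ++ '#' :: tl).getD pl.length d = '#' := by
  simp [List.getD, List.getElem?_append_right (le_refl pl.length)]

theorem combGet_hi (pl tl : List Char) (y : Nat) (d : Char) :
    (pl ++ '#' :: tl).getD (pl.length + 1 + y) d = tl.getD y d := by
  rw [List.getD, List.getElem?_append_right (by omega), List.getD]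
  congr 1
  rw [(by omega : pl.length + 1 + y - pl.length = y + 1), List.getElem?_cons_succ]

theorem occ_iff (tl pl : List Char) (j : Nat) (hjm : j + pl.length ≤ tl.length) :
    (tl.drop j).take pl.length = pl ↔
      ∀ x < pl.length, tl.getD (j + x) ' ' = pl.getD x ' ' := by
  constructor
  · intro h x hx
    have h1 : ((tl.drop j).take pl.length).getD x ' ' = pl.getD x ' ' := by rw [h]
    rw [List.getD, List.getElem?_take, if_pos hx, List.getElem?_drop] at h1
    exact h1
  · intro h
    apply List.ext_getElem
    · simp; omega
    · intro x hx1 hx2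
      have := h x hx2
      rw [List.getD_eq_getElem tl ' ' (by omega), List.getD_eq_getElem pl ' ' hx2] at this
      simp only [List.getElem_take, List.getElem_drop]
      exact this

theorem occ_le (tl pl : List Char) (j : Nat) (hm : 1 ≤ pl.length)
    (h : (tl.drop j).take pl.length = pl) : j + pl.length ≤ tl.length := by
  have := congrArg List.length h
  simp at this
  omega

theorem zf_comb (tl pl : List Char) (hm : 1 ≤ pl.length) (j : Nat) (hj : j < tl.length) :
    zf (pl ++ '#' :: tl) (pl.length + 1 + j) = pl.length ↔
      ((tl.drop j).take pl.length = pl ∧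
        (j + pl.length = tl.length ∨ tl.getD (j + pl.length) ' ' ≠ '#')) := by
  set s := pl ++ '#' :: tl with hs
  set m := pl.length
  set n := tl.length
  set i := m + 1 + j with hi
  have hsl : s.length = m + 1 + n := by simp [hs]; omega
  have hsub : s.length - i = n - j := by omega
  constructor
  · intro h
    have hle : zf s i ≤ n - j := by have := zf_le s i; omega
    have hjm : j + m ≤ n := by omega
    refine ⟨(occ_iff tl pl j hjm).mpr ?_, ?_⟩
    · intro x hx
      have := zf_agree s i x ' ' (by omega)
      rw [combGet_lo pl tl x ' ' hx, (by omega : i + x = m + 1 + (j + x)),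
        combGet_hi pl tl (j + x) ' '] at this
      exact this.symm
    · by_cases hsplit : j + m = n
      · exact Or.inl hsplit
      · refine Or.inr ?_
        have hstuck := zf_stuck s i ' ' (by omega)
        rw [h, combGet_sep pl tl ' ', (by omega : i + m = m + 1 + (j + m)),
          combGet_hi pl tl (j + m) ' '] at hstuck
        exact fun hcontra => hstuck hcontra.symm
  · rintro ⟨hocc, hbnd⟩
    have hjm : j + m ≤ n := occ_le tl pl j hm hocc
    have hag := (occ_iff tl pl j hjm).mp hocc
    have hge : m ≤ zf s i := by
      refine zf_ge s i m ' ' (by omega) ?_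
      intro x hx
      rw [combGet_lo pl tl x ' ' hx, (by omega : i + x = m + 1 + (j + x)),
        combGet_hi pl tl (j + x) ' ']
      exact (hag x hx).symm
    have hle : zf s i ≤ m := by
      by_contra hgt
      push_neg at hgt
      have hzle := zf_le s i
      have hlt : j + m < n := by omega
      have hne : tl.getD (j + m) ' ' ≠ '#' := by
        rcases hbnd with h | h
        · omega
        · exact h
      have := zf_agree s i m ' ' hgt
      rw [combGet_sep pl tl ' ', (by omega : i + m = m + 1 + (j + m)),
        combGet_hi pl tl (j + m) ' '] at this
      exact hne this.symm
    omega

-- A's result as "occurrences whose following character is not the separator"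
theorem z_search_eq (t p : String) (hp : p ≠ "") (ht : t ≠ "")
    (hmn : p.toList.length ≤ t.toList.length) :
    z_search t p =
      ((List.range t.toList.length).filter (fun k =>
        decide ((t.toList.drop k).take p.toList.length = p.toList ∧
          (k + p.toList.length = t.toList.length ∨
            t.toList.getD (k + p.toList.length) ' ' ≠ '#')))).map (fun k : Nat => (k : Int)) := by
  unfold z_search
  set pl := p.toList
  set tl := t.toList
  set m := pl.length with hm
  set n := tl.length with hn
  have hm1 : 1 ≤ m := by
    have : pl ≠ [] := by simpa [pl] using hp
    cases hpl : pl with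
    | nil => exact absurd hpl this
    | cons a as => simp [hm, hpl]
  have hcl : (pl ++ '#' :: tl).length = m + 1 + n := by simp [hm, hn]; omega
  have hcomb : (pl ++ '#' :: tl) ≠ [] := by simp
  rw [if_neg (by simp [hp, ht]), if_neg (by omega)]
  rw [PySem.List.foldl_append_ite (fun i : Int =>
      (compute_z_function (pl ++ '#' :: tl)).getD i.toNat 0 = m) (fun i : Int => i - (m : Int) - 1)]
  rw [PySem.List.pyRange_one, hcl]
  rw [(by push_cast; omega : (((m + 1 + n : Nat) : Int) - ((m : Int) + 1)).toNat = n)]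
  rw [List.filter_map, List.map_map, List.nil_append]
  have hfil : ∀ k ∈ List.range n,
      ((fun i : Int => decide ((compute_z_function (pl ++ '#' :: tl)).getD i.toNat 0 = m)) ∘
        (fun k : Nat => ((m : Int) + 1 + (k : Int)))) k =
      (fun k => decide ((tl.drop k).take m = pl ∧
          (k + m = n ∨ tl.getD (k + m) ' ' ≠ '#'))) k := by
    intro k hk
    have hkn : k < n := List.mem_range.mp hk
    simp only [Function.comp]
    rw [(by omega : ((m : Int) + 1 + (k : Int)).toNat = m + 1 + k)]
    rw [compute_z_getD (pl ++ '#' :: tl) hcomb (m + 1 + k) (by omega)]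
    exact decide_eq_decide.mpr (zf_comb tl pl hm1 k hkn)
  rw [List.filter_congr hfil]
  refine List.map_congr_left ?_
  intro k _
  simp only [Function.comp]
  push_cast
  ring

-- B's result as "all occurrences"
theorem z_search_alt_eq (t p : String) (hp : p ≠ "") (hmn : p.toList.length ≤ t.toList.length) :
    z_search_alt t p =
      ((List.range (t.toList.length - p.toList.length + 1)).filter (fun k =>
        decide ((t.toList.drop k).take p.toList.length = p.toList))).map (fun k : Nat => (k : Int)) := by
  simp only [z_search_alt, if_neg hp]
  set pl := p.toList
  set tl := t.toList
  set m := pl.length with hm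
  set n := tl.length with hn
  rw [PySem.List.pyRange_one, (by omega : (((n : Nat) : Int) - (m : Int) + 1 - 0).toNat = n - m + 1)]
  rw [List.filter_map]
  have hfil : ∀ k ∈ List.range (n - m + 1),
      ((fun i : Int => decide (PySem.List.slice tl (some i) (some (i + (m : Int))) = pl)) ∘
        (fun k : Nat => (0 : Int) + (k : Int))) k =
      (fun k => decide ((tl.drop k).take m = pl)) k := by
    intro k _
    refine decide_eq_decide.mpr ?_
    show PySem.List.slice tl (some ((0 : Int) + (k : Int)))
        (some ((0 : Int) + (k : Int) + (m : Int))) = pl ↔ _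
    rw [(by push_cast; ring : (0 : Int) + (k : Int) = ((k : Nat) : Int)),
      PySem.List.slice_natCast_add tl k m]
  rw [List.filter_congr hfil]
  refine List.map_congr_left ?_
  intro k _
  simp

theorem toList_ne_nil_of_ne_empty (p : String) (hp : p ≠ "") : 1 ≤ p.toList.length := by
  rcases hpl : p.toList with _ | ⟨a, as⟩
  · exact absurd ((by simpa using hpl : p = "")) hp
  · simp

theorem infix_iff_occ (tl pl : List Char) :
    (pl ++ ['#']) <:+: tl ↔ ∃ j, j + pl.length < tl.length ∧
      (tl.drop j).take pl.length = pl ∧ tl.getD (j + pl.length) ' ' = '#' := by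
  constructor
  · rintro ⟨s, e, rfl⟩
    have hsh : (s ++ (pl ++ ['#'])) ++ e = s ++ (pl ++ ('#' :: e)) := by simp
    refine ⟨s.length, ?_, ?_, ?_⟩
    · simp only [List.length_append, List.length_cons]
      simp
      omega
    · rw [hsh, List.drop_left, List.take_left]
    · rw [hsh, List.getD, List.getElem?_append_right (by omega),
        (by omega : s.length + pl.length - s.length = pl.length),
        List.getElem?_append_right (le_refl pl.length)]
      simp
  · rintro ⟨j, hjm, hocc, hhash⟩
    have hlen : pl.length < (tl.drop j).length := by simp; omega
    have h1 : (tl.drop j).take (pl.length + 1) = pl ++ ['#'] := by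
      rw [List.take_succ, hocc]
      congr 1
      rw [List.getElem?_eq_getElem hlen]
      have : (tl.drop j)[pl.length] = '#' := by
        rw [← List.getD_eq_getElem (tl.drop j) ' ' hlen, getD_drop]
        exact hhash
      rw [this]
      rfl
    exact ⟨tl.take j, (tl.drop j).drop (pl.length + 1), by
      rw [← h1, List.append_assoc, List.take_append_drop, List.take_append_drop]⟩

theorem z_search_spec : Claim_unchanged_z_search := by
  intro t p _ hnD
  by_cases hp : p = ""
  · subst hp; simp [z_search, z_search_alt]
  by_cases hmn : p.toList.length ≤ t.toList.length
  · by_cases ht : t = ""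
    · exfalso
      have h0 : t.toList.length = 0 := by subst ht; simp
      have := toList_ne_nil_of_ne_empty p hp
      omega
    rw [z_search_eq t p hp ht hmn, z_search_alt_eq t p hp hmn]
    have hm1 : 1 ≤ p.toList.length := toList_ne_nil_of_ne_empty p hp
    -- beyond index n - m the window no longer fits: that part of A's index range is dead
    have hsplit : List.range t.toList.length = List.range (t.toList.length - p.toList.length + 1) ++
        (List.range (p.toList.length - 1)).map (fun x => (t.toList.length - p.toList.length + 1) + x) := by
      rw [← List.range_add]
      congr 1
      omega
    rw [hsplit, List.filter_append]
    have hnil : ((List.range (p.toList.length - 1)).map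
        (fun x => (t.toList.length - p.toList.length + 1) + x)).filter (fun k =>
        decide ((t.toList.drop k).take p.toList.length = p.toList ∧
          (k + p.toList.length = t.toList.length ∨
            t.toList.getD (k + p.toList.length) ' ' ≠ '#'))) = [] := by
      rw [List.filter_eq_nil_iff]
      intro a ha
      rcases List.mem_map.mp ha with ⟨x, _, rfl⟩
      simp only [decide_eq_true_eq]
      rintro ⟨hocc, -⟩
      have := occ_le t.toList p.toList _ hm1 hocc
      omega
    rw [hnil, List.append_nil]
    congr 1
    refine List.filter_congr ?_
    intro k hk
    have hkn : k < t.toList.length - p.toList.length + 1 := List.mem_range.mp hk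
    refine decide_eq_decide.mpr ⟨fun h => h.1, fun hocc => ⟨hocc, ?_⟩⟩
    by_cases hend : k + p.toList.length = t.toList.length
    · exact Or.inl hend
    refine Or.inr ?_
    intro hhash
    have hmem : '#' ∈ t.toList := by
      rw [← hhash, List.getD_eq_getElem t.toList ' ' (by omega)]
      exact List.getElem_mem _
    exact hnD ⟨hp, hmem, (infix_iff_occ t.toList p.toList).mpr ⟨k, by omega, hocc, hhash⟩⟩
  · -- m > n: both sides are empty
    push_neg at hmn
    have hA : z_search t p = [] := by
      unfold z_search
      by_cases ht : t = ""
      · rw [if_pos (Or.inr ht)]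
      · rw [if_neg (by simp [hp, ht]), if_pos (by omega)]
    have hB : z_search_alt t p = [] := by
      simp only [z_search_alt, if_neg hp]
      rw [PySem.List.pyRange_one_eq_nil (by push_cast; omega), List.filter_nil]
    rw [hA, hB]

theorem z_search_changed : Claim_changed_z_search := by
  unfold Claim_changed_z_search; decide

theorem z_search_tight : Claim_exact_z_search := by
  intro t p _ hD hEq
  obtain ⟨hp, -, hinf⟩ := hD
  obtain ⟨j, hjm, hocc, hhash⟩ := (infix_iff_occ t.toList p.toList).mp hinf
  have hm1 : 1 ≤ p.toList.length := toList_ne_nil_of_ne_empty p hp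
  have hmn : p.toList.length ≤ t.toList.length := by omega
  have ht : t ≠ "" := by
    intro h
    rw [h] at hjm
    simp at hjm
  rw [z_search_eq t p hp ht hmn, z_search_alt_eq t p hp hmn] at hEq
  have hmem : (j : Int) ∈ ((List.range (t.toList.length - p.toList.length + 1)).filter (fun k =>
      decide ((t.toList.drop k).take p.toList.length = p.toList))).map (fun k : Nat => (k : Int)) := by
    refine List.mem_map.mpr ⟨j, ?_, rfl⟩
    refine List.mem_filter.mpr ⟨List.mem_range.mpr (by omega), by simpa using hocc⟩
  rw [← hEq] at hmem
  rcases List.mem_map.mp hmem with ⟨k, hkmem, hkj⟩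
  have hkj' : k = j := by exact_mod_cast hkj
  subst hkj'
  have hpred := (List.mem_filter.mp hkmem).2
  simp only [decide_eq_true_eq] at hpred
  rcases hpred.2 with h | h
  · omega
  · exact h hhash
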